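-- pv_equiv track=rewrite | github.com/posl/comment_recommendation | script/split_gen/3_time/zh/112_B/3.py | searchBestRoute
-- ===== SOURCE A (Python) =====
-- def searchBestRoute(N, T, c, t):
--     if N <= 0:
--         return 0
--     if T <= 0:
--         return 0
--     if T < min(t):
--         return 0
--     if T == min(t):
--         return min(c)
--     if N == 1:
--         return c[0]
--     if N == 2:
--         if T >= t[0] and T >= t[1]:
--             return min(c)
--         elif T >= t[0] and T < t[1]:
--             return c[0]
--         elif T >= t[1] and T < t[0]:
--             return c[1]
--         else:
--             return 0
--     if N > 2:
--         if T >= t[0]: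
--             return min(c[0] + searchBestRoute(N - 1, T - t[0], c[1:], t[1:]),
--                        searchBestRoute(N - 1, T, c[1:], t[1:]))
--         else:
--             return searchBestRoute(N - 1, T, c[1:], t[1:])
-- ===== SOURCE B (Python) =====
-- def _suffix_min(xs):
--     out = [0] * len(xs)
--     m = None
--     for i in range(len(xs) - 1, -1, -1):
--         m = xs[i] if m is None or xs[i] < m else m
--         out[i] = m
--     return out
--
--
-- def searchBestRoute(N, T, c, t):
--     if N <= 0 or T <= 0:
--         return 0
--     sufT = _suffix_min(t)
--     sufC = _suffix_min(c)
--     memo = {}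
--
--     def go(i, b):
--         n = N - i
--         if n <= 0 or b <= 0:
--             return 0
--         if b < sufT[i]:
--             return 0
--         key = (i, b)
--         if key in memo:
--             return memo[key]
--         if b == sufT[i]:
--             r = sufC[i]
--         elif n == 1:
--             r = c[i]
--         elif n == 2:
--             t0, t1 = t[i], t[i + 1]
--             if b >= t0 and b >= t1:
--                 r = sufC[i]
--             elif b >= t0:
--                 r = c[i]
--             elif b >= t1:
--                 r = c[i + 1]
--             else:
--                 r = 0
--         else:
--             t0 = t[i]
--             if b >= t0:
--                 r = min(c[i] + go(i + 1, b - t0), go(i + 1, b))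
--             else:
--                 r = go(i + 1, b)
--         memo[key] = r
--         return r
--
--     return go(0, T)
-- ===== Notes on version B (the rewrite author's own statement) =====
-- stated objective: faster
-- what changed: A's exponential branching recursion over ever-new list slices is replaced by a memoized recursion over (index, remaining-budget) states with precomputed suffix-minimum arrays, so repeated states are computed once and no slices are copied.
-- outside the precondition, e.g. on searchBestRoute(3, 5, [1, 2], [4, 5]): A returns 1, B returns 1; on searchBestRoute(1, 1, [], []): A raises ValueError, B raises IndexError
import Mathlib
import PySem

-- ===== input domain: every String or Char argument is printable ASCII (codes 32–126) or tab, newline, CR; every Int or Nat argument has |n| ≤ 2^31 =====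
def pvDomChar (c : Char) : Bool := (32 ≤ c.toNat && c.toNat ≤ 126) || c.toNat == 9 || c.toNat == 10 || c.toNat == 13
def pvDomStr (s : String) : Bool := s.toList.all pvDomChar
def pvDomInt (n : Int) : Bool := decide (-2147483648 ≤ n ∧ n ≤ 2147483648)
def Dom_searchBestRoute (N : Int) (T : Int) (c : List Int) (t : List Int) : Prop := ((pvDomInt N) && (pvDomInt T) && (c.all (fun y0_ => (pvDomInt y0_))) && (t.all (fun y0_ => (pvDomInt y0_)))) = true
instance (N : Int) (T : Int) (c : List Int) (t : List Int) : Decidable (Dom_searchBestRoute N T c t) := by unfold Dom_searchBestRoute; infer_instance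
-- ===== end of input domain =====

-- B replaces A's exponential branching recursion over list slices by a memoized
-- recursion over (index, remaining budget) states with precomputed suffix minima.

-- shared indexing shim: xs[i] where the Python index is known in range under Pre_
def pvGetI (xs : List Int) (i : Int) : Int := (PySem.List.pyGet? xs i).getD 0

-- ===== PORT A =====
def searchBestRoute (N : Int) (T : Int) (c : List Int) (t : List Int) : Int :=
  if N ≤ 0 then 0
  else if T ≤ 0 then 0
  else
    -- min(t): Python raises ValueError on empty t; Pre_ keeps such inputs out
    let mt := (PySem.List.min? t (fun x => x)).getD 0
    if T < mt then 0
    else if T = mt then (PySem.List.min? c (fun x => x)).getD 0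
    else if N = 1 then pvGetI c 0
    else if N = 2 then
      (if pvGetI t 0 ≤ T ∧ pvGetI t 1 ≤ T then (PySem.List.min? c (fun x => x)).getD 0
       else if pvGetI t 0 ≤ T ∧ T < pvGetI t 1 then pvGetI c 0
       else if pvGetI t 1 ≤ T ∧ T < pvGetI t 0 then pvGetI c 1
       else 0)
    else if h : 2 < N then
      (if pvGetI t 0 ≤ T then
        min (pvGetI c 0 + searchBestRoute (N - 1) (T - pvGetI t 0)
              (PySem.List.slice c (some 1) none) (PySem.List.slice t (some 1) none))
            (searchBestRoute (N - 1) T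
              (PySem.List.slice c (some 1) none) (PySem.List.slice t (some 1) none))
       else searchBestRoute (N - 1) T
              (PySem.List.slice c (some 1) none) (PySem.List.slice t (some 1) none))
    else 0  -- unreachable: N > 0, N ≠ 1, N ≠ 2 forces N > 2 (Python would fall off returning None)
termination_by N.toNat
decreasing_by all_goals omega

-- ===== PORT B =====
-- _suffix_min: out[i] = min(xs[i:]), built back-to-front (the Python loop runs i from len-1 down to 0)
def sufMinB (xs : List Int) : List Int :=
  match xs with
  | [] => []
  | x :: rest =>
    match sufMinB rest with
    | [] => [x]
    | m :: r => (if x < m then x else m) :: m :: r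

-- go(i, b) with the memo dict threaded through; fuel bounds the recursion depth (N - i shrinks)
def goB (N : Int) (c t sufT sufC : List Int) :
    Nat → Int → Int → PySem.Dict (Int × Int) Int → Int × PySem.Dict (Int × Int) Int
  | 0, _, _, memo => (0, memo)
  | fuel + 1, i, b, memo =>
    if N - i ≤ 0 ∨ b ≤ 0 then (0, memo)
    else if b < pvGetI sufT i then (0, memo)
    else
      match memo.get? (i, b) with
      | some v => (v, memo)
      | none =>
        let r :=
          if b = pvGetI sufT i then (pvGetI sufC i, memo)
          else if N - i = 1 then (pvGetI c i, memo)
          else if N - i = 2 then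
            ((if pvGetI t i ≤ b ∧ pvGetI t (i + 1) ≤ b then pvGetI sufC i
              else if pvGetI t i ≤ b then pvGetI c i
              else if pvGetI t (i + 1) ≤ b then pvGetI c (i + 1)
              else 0), memo)
          else
            if pvGetI t i ≤ b then
              let p1 := goB N c t sufT sufC fuel (i + 1) (b - pvGetI t i) memo
              let p2 := goB N c t sufT sufC fuel (i + 1) b p1.2
              (min (pvGetI c i + p1.1) p2.1, p2.2)
            else goB N c t sufT sufC fuel (i + 1) b memo
        (r.1, r.2.insert (i, b) r.1)

def searchBestRoute_alt (N : Int) (T : Int) (c : List Int) (t : List Int) : Int :=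
  if N ≤ 0 ∨ T ≤ 0 then 0
  else (goB N c t (sufMinB t) (sufMinB c) N.toNat 0 T PySem.Dict.empty).1

-- ===== PRECONDITION & SPEC =====
-- Pre_ excludes inputs whose N exceeds the length of c or t (beyond the cases answered by the
-- leading guards), a call-convention mismatch on which A's deep recursion over the unsliced tails
-- may raise ValueError/IndexError or return by accident of how far it happens to get.
def Pre_searchBestRoute (N : Int) (T : Int) (c : List Int) (t : List Int) : Prop :=
  N ≤ 0 ∨ T ≤ 0
  ∨ (0 < N ∧ N ≤ (c.length : Int) ∧ N ≤ (t.length : Int))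
  ∨ (0 < N ∧ t ≠ [] ∧ T < (PySem.List.min? t (fun x => x)).getD 0)
  ∨ (0 < N ∧ t ≠ [] ∧ c ≠ [] ∧ T = (PySem.List.min? t (fun x => x)).getD 0)
instance (N : Int) (T : Int) (c : List Int) (t : List Int) : Decidable (Pre_searchBestRoute N T c t) := by
  unfold Pre_searchBestRoute; infer_instance

def pvWitness_searchBestRoute : Int × Int × List Int × List Int := (3, 10, [4, 1, 6], [2, 5, 3])

def Spec_searchBestRoute (N : Int) (T : Int) (c : List Int) (t : List Int) (out : Int) : Prop := out = searchBestRoute_alt N T c t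
instance (N : Int) (T : Int) (c : List Int) (t : List Int) (out : Int) : Decidable (Spec_searchBestRoute N T c t out) := by unfold Spec_searchBestRoute; infer_instance

-- ===== CLAIM (what is proved, stated in full; the proofs are below) =====
def Claim_equal_searchBestRoute : Prop := ∀ (N : Int) (T : Int) (c : List Int) (t : List Int), Dom_searchBestRoute N T c t → Pre_searchBestRoute N T c t → Spec_searchBestRoute N T c t (searchBestRoute N T c t)

-- ===== LEMMAS AND PROOFS =====

theorem foldl_min_min (l : List Int) : ∀ (a b : Int), l.foldl min (min a b) = min a (l.foldl min b) := by
  induction l with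
  | nil => intro a b; rfl
  | cons x l ih =>
    intro a b
    simp only [List.foldl_cons]
    rw [min_assoc, ih]

theorem sufMinB_getElem? (xs : List Int) : ∀ (k : Nat),
    (sufMinB xs)[k]? = PySem.List.min? (xs.drop k) (fun x => x) := by
  induction xs with
  | nil =>
    intro k
    simp [sufMinB, (PySem.List.min?_eq_none_iff ([] : List Int) (fun x => x)).2 rfl]
  | cons x rest ih =>
    intro k
    cases hs : sufMinB rest with
    | nil =>
      have h0 := ih 0
      rw [hs] at h0
      have hrest : rest = [] := by
        have := (PySem.List.min?_eq_none_iff rest (fun x => x)).1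
        simp at h0
        exact this h0.symm
      subst hrest
      cases k with
      | zero => simp [sufMinB, PySem.List.min?_id_cons]
      | succ k =>
        simp [sufMinB]
        exact ((PySem.List.min?_eq_none_iff ([] : List Int) (fun x => x)).2 rfl).symm
    | cons m r =>
      have hshape : sufMinB (x :: rest) = (if x < m then x else m) :: m :: r := by
        simp [sufMinB, hs]
      cases k with
      | zero =>
        have h0 := ih 0
        rw [hs] at h0
        cases rest with
        | nil => simp [sufMinB] at hs
        | cons y r' =>
          rw [List.drop_zero, PySem.List.min?_id_cons] at h0
          have hm : m = List.foldl min y r' := by simpa using h0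
          have hfold : List.foldl min x (y :: r') = min x m := by
            rw [hm]
            simp only [List.foldl_cons]
            exact foldl_min_min r' x y
          have hmin : (if x < m then x else m) = min x m := by
            rcases lt_trichotomy x m with h | h | h <;> simp [min_def] <;> omega
          rw [hshape, List.drop_zero, PySem.List.min?_id_cons, hfold, hmin]
          simp
      | succ k =>
        rw [hshape]
        have h1 : ((if x < m then x else m) :: m :: r)[k + 1]? = (m :: r)[k]? := by simp
        rw [h1, ← hs, ih k]
        simp

theorem pvGetI_sufMinB (xs : List Int) (i : Int) (hi : 0 ≤ i) :
    pvGetI (sufMinB xs) i = (PySem.List.min? (xs.drop i.toNat) (fun x => x)).getD 0 := by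
  unfold pvGetI
  rw [PySem.List.pyGet?_of_nonneg _ hi, sufMinB_getElem?]

theorem pvGetI_drop (xs : List Int) (i : Int) (hi : 0 ≤ i) (k : Nat) :
    pvGetI (xs.drop i.toNat) (k : Int) = pvGetI xs (i + k) := by
  unfold pvGetI
  rw [PySem.List.pyGet?_of_nonneg _ (by omega : (0:Int) ≤ (k : Int)),
      PySem.List.pyGet?_of_nonneg _ (by omega : (0:Int) ≤ i + k)]
  rw [List.getElem?_drop]
  have h1 : ((k : Int)).toNat = k := by omega
  have h2 : i.toNat + ((k : Int)).toNat = (i + k).toNat := by omega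
  rw [h2]

-- memo validity: every stored value is A's answer for the corresponding suffix state
def MemoOK (N : Int) (c t : List Int) (memo : PySem.Dict (Int × Int) Int) : Prop :=
  ∀ (j b' : Int) (v : Int), memo.get? (j, b') = some v →
    v = searchBestRoute (N - j) b' (c.drop j.toNat) (t.drop j.toNat)

theorem goB_correct (N : Int) (c t : List Int) :
    ∀ (fuel : Nat) (i b : Int) (memo : PySem.Dict (Int × Int) Int),
      0 ≤ i → (N - i).toNat ≤ fuel → MemoOK N c t memo →
      (goB N c t (sufMinB t) (sufMinB c) fuel i b memo).1
          = searchBestRoute (N - i) b (c.drop i.toNat) (t.drop i.toNat)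
        ∧ MemoOK N c t (goB N c t (sufMinB t) (sufMinB c) fuel i b memo).2 := by
  intro fuel
  induction fuel with
  | zero =>
    intro i b memo hi hfuel hmemo
    have hNi : N - i ≤ 0 := by omega
    refine ⟨?_, hmemo⟩
    show (0 : Int) = _
    rw [searchBestRoute]
    simp [hNi]
  | succ fuel ih =>
    intro i b memo hi hfuel hmemo
    rw [goB]
    by_cases h0 : N - i ≤ 0 ∨ b ≤ 0
    · rw [if_pos h0]
      refine ⟨?_, hmemo⟩
      show (0 : Int) = _
      rw [searchBestRoute]
      rcases h0 with h | h
      · simp [h]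
      · by_cases hN : N - i ≤ 0 <;> simp [hN, h]
    · rw [if_neg h0]
      have hNi : 0 < N - i := by omega
      have hb : 0 < b := by omega
      have hsT : pvGetI (sufMinB t) i = (PySem.List.min? (t.drop i.toNat) (fun x => x)).getD 0 :=
        pvGetI_sufMinB t i hi
      have hsC : pvGetI (sufMinB c) i = (PySem.List.min? (c.drop i.toNat) (fun x => x)).getD 0 :=
        pvGetI_sufMinB c i hi
      by_cases hlt : b < pvGetI (sufMinB t) i
      · rw [if_pos hlt]
        refine ⟨?_, hmemo⟩
        show (0 : Int) = _
        rw [searchBestRoute,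
            if_neg (show ¬ N - i ≤ 0 by omega), if_neg (show ¬ b ≤ 0 by omega)]
        rw [← hsT, if_pos hlt]
      · rw [if_neg hlt]
        cases hget : memo.get? (i, b) with
        | some v =>
          exact ⟨hmemo i b v hget, hmemo⟩
        | none =>
          have hsl_c : PySem.List.slice (c.drop i.toNat) (some 1) none = c.drop (i + 1).toNat := by
            rw [PySem.List.slice_from_one, List.tail_drop]
            congr 1
            omega
          have hsl_t : PySem.List.slice (t.drop i.toNat) (some 1) none = t.drop (i + 1).toNat := by
            rw [PySem.List.slice_from_one, List.tail_drop]
            congr 1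
            omega
          have hg_c0 : pvGetI (c.drop i.toNat) 0 = pvGetI c i := by
            have h := pvGetI_drop c i hi 0
            simpa using h
          have hg_t0 : pvGetI (t.drop i.toNat) 0 = pvGetI t i := by
            have h := pvGetI_drop t i hi 0
            simpa using h
          have hg_c1 : pvGetI (c.drop i.toNat) 1 = pvGetI c (i + 1) := by
            have h := pvGetI_drop c i hi 1
            simpa using h
          have hg_t1 : pvGetI (t.drop i.toNat) 1 = pvGetI t (i + 1) := by
            have h := pvGetI_drop t i hi 1
            simpa using h
          have key : ∀ (r : Int × PySem.Dict (Int × Int) Int),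
              r.1 = searchBestRoute (N - i) b (c.drop i.toNat) (t.drop i.toNat) →
              MemoOK N c t r.2 →
              (r.1, r.2.insert (i, b) r.1).1 = searchBestRoute (N - i) b (c.drop i.toNat) (t.drop i.toNat)
                ∧ MemoOK N c t (r.1, r.2.insert (i, b) r.1).2 := by
            intro r hr1 hr2
            refine ⟨hr1, ?_⟩
            intro j b' v hv
            rw [PySem.Dict.get?_insert] at hv
            by_cases hkey : (j, b') = (i, b)
            · rw [if_pos hkey] at hv
              have hj : j = i := congrArg Prod.fst hkey
              have hb2 : b' = b := congrArg Prod.snd hkey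
              subst hj
              subst hb2
              cases hv
              exact hr1
            · rw [if_neg hkey] at hv
              exact hr2 j b' v hv
          refine key _ ?_ ?_
          · -- the value r.1 equals A on this suffix state
            rw [searchBestRoute,
                if_neg (show ¬ N - i ≤ 0 by omega), if_neg (show ¬ b ≤ 0 by omega)]
            rw [hsl_c, hsl_t, hg_c0, hg_t0, hg_c1, hg_t1, ← hsT, ← hsC]
            rw [if_neg hlt]
            by_cases heq : b = pvGetI (sufMinB t) i
            · rw [if_pos heq, if_pos heq]
            · rw [if_neg heq, if_neg heq]
              by_cases h1 : N - i = 1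
              · rw [if_pos h1, if_pos h1]
              · rw [if_neg h1, if_neg h1]
                by_cases h2 : N - i = 2
                · rw [if_pos h2, if_pos h2]
                  by_cases hA0 : pvGetI t i ≤ b <;> by_cases hA1 : pvGetI t (i + 1) ≤ b
                  · rw [if_pos ⟨hA0, hA1⟩, if_pos ⟨hA0, hA1⟩]
                  · rw [if_neg (show ¬ (pvGetI t i ≤ b ∧ pvGetI t (i + 1) ≤ b) by tauto),
                        if_neg (show ¬ (pvGetI t i ≤ b ∧ pvGetI t (i + 1) ≤ b) by tauto),
                        if_pos hA0, if_pos ⟨hA0, show b < pvGetI t (i + 1) by omega⟩]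
                  · rw [if_neg (show ¬ (pvGetI t i ≤ b ∧ pvGetI t (i + 1) ≤ b) by tauto),
                        if_neg (show ¬ (pvGetI t i ≤ b ∧ pvGetI t (i + 1) ≤ b) by tauto),
                        if_neg hA0, if_pos hA1,
                        if_neg (show ¬ (pvGetI t i ≤ b ∧ b < pvGetI t (i + 1)) by tauto),
                        if_pos ⟨hA1, show b < pvGetI t i by omega⟩]
                  · rw [if_neg (show ¬ (pvGetI t i ≤ b ∧ pvGetI t (i + 1) ≤ b) by tauto),
                        if_neg (show ¬ (pvGetI t i ≤ b ∧ pvGetI t (i + 1) ≤ b) by tauto),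
                        if_neg hA0, if_neg hA1,
                        if_neg (show ¬ (pvGetI t i ≤ b ∧ b < pvGetI t (i + 1)) by tauto),
                        if_neg (show ¬ (pvGetI t (i + 1) ≤ b ∧ b < pvGetI t i) by tauto)]
                · rw [if_neg h2, if_neg h2, dif_pos (show 2 < N - i by omega)]
                  have hfuel' : (N - (i + 1)).toNat ≤ fuel := by omega
                  have hi' : 0 ≤ i + 1 := by omega
                  have harg : N - i - 1 = N - (i + 1) := by omega
                  by_cases hb0 : pvGetI t i ≤ b
                  · obtain ⟨e1, m1ok⟩ := ih (i + 1) (b - pvGetI t i) memo hi' hfuel' hmemo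
                    obtain ⟨e2, m2ok⟩ := ih (i + 1) b _ hi' hfuel' m1ok
                    rw [if_pos hb0, if_pos hb0, harg, ← e1, ← e2]
                  · obtain ⟨e1, _⟩ := ih (i + 1) b memo hi' hfuel' hmemo
                    rw [if_neg hb0, if_neg hb0, harg, ← e1]
          · -- the memo r.2 stays valid
            by_cases heq : b = pvGetI (sufMinB t) i
            · rw [if_pos heq]
              exact hmemo
            · rw [if_neg heq]
              by_cases h1 : N - i = 1
              · rw [if_pos h1]
                exact hmemo
              · rw [if_neg h1]
                by_cases h2 : N - i = 2
                · rw [if_pos h2]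
                  exact hmemo
                · rw [if_neg h2]
                  have hfuel' : (N - (i + 1)).toNat ≤ fuel := by omega
                  have hi' : 0 ≤ i + 1 := by omega
                  by_cases hb0 : pvGetI t i ≤ b
                  · rw [if_pos hb0]
                    obtain ⟨_, m1ok⟩ := ih (i + 1) (b - pvGetI t i) memo hi' hfuel' hmemo
                    obtain ⟨_, m2ok⟩ := ih (i + 1) b _ hi' hfuel' m1ok
                    exact m2ok
                  · rw [if_neg hb0]
                    obtain ⟨_, m1ok⟩ := ih (i + 1) b memo hi' hfuel' hmemo
                    exact m1ok

-- ===== VERDICT (by name: the statement is the Claim_ definition above) =====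
theorem searchBestRoute_spec : Claim_equal_searchBestRoute := by
  intro N T c t _ hpre
  unfold Spec_searchBestRoute
  by_cases hN : N ≤ 0
  · rw [searchBestRoute, if_pos hN]
    unfold searchBestRoute_alt
    rw [if_pos (Or.inl hN)]
  · by_cases hT : T ≤ 0
    · rw [searchBestRoute, if_neg hN, if_pos hT]
      unfold searchBestRoute_alt
      rw [if_pos (Or.inr hT)]
    · have hN0 : 0 < N := by omega
      have hT0 : 0 < T := by omega
      unfold searchBestRoute_alt
      rw [if_neg (by tauto)]
      have hg0 : pvGetI (sufMinB t) 0 = (PySem.List.min? t (fun x => x)).getD 0 := by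
        have h := pvGetI_sufMinB t 0 (le_refl 0)
        simpa using h
      have hgC0 : pvGetI (sufMinB c) 0 = (PySem.List.min? c (fun x => x)).getD 0 := by
        have h := pvGetI_sufMinB c 0 (le_refl 0)
        simpa using h
      obtain ⟨f, hf⟩ : ∃ f, N.toNat = f + 1 := ⟨N.toNat - 1, by omega⟩
      rcases hpre with h | h | ⟨_, hcL, htL⟩ | ⟨_, _, hTlt⟩ | ⟨_, _, _, hTeq⟩
      · omega
      · omega
      · obtain ⟨e, _⟩ := goB_correct N c t N.toNat 0 T PySem.Dict.empty (le_refl 0) (by omega)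
          (fun j b' v hv => by simp [PySem.Dict.get?_empty] at hv)
        rw [e]
        norm_num
      · rw [hf, goB]
        rw [if_neg (show ¬ (N - 0 ≤ 0 ∨ T ≤ 0) by omega)]
        rw [hg0, if_pos hTlt]
        rw [searchBestRoute, if_neg hN, if_neg hT, if_pos hTlt]
      · have hnlt : ¬ T < (PySem.List.min? t (fun x => x)).getD 0 := by omega
        rw [hf, goB]
        rw [if_neg (show ¬ (N - 0 ≤ 0 ∨ T ≤ 0) by omega)]
        rw [hg0, if_neg hnlt]
        rw [PySem.Dict.get?_empty]
        rw [if_pos hTeq, hgC0]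
        rw [searchBestRoute, if_neg hN, if_neg hT, if_neg hnlt, if_pos hTeq]
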